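-- pv_equiv track=rewrite | github.com/chamodi27/e20-4yp-symbolic-music-generation-with-xLSTM | demo_app/backend/token_analysis.py | segment_bars
-- ===== SOURCE A (Python) =====
-- from typing import List, Optional
--
-- BAR_PREFIX   = "b"
--
-- def _prefix(tok: str) -> Optional[str]:
--     """Return the single-letter prefix of a token, or None if malformed."""
--     idx = tok.find("-")
--     if idx < 1:
--         return None
--     return tok[:idx]
--
-- def segment_bars(tokens: List[str]) -> List[List[str]]:
--     """
--     Split a token list into bars.
--     Each bar is the slice between two consecutive b-1 tokens (inclusive of b-1 at the end).
--     Tokens before the first b-1 form bar 0 (may be the prompt header).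
--
--     Returns:
--         List of bars, each bar is a list of tokens ending with 'b-1'.
--     """
--     bars: List[List[str]] = []
--     current: List[str] = []
--     for tok in tokens:
--         current.append(tok)
--         if _prefix(tok) == BAR_PREFIX:
--             bars.append(current)
--             current = []
--     # Any trailing tokens that didn't close with b-1 are a partial bar — discard.
--     return bars
-- ===== SOURCE B (Python) =====
-- from typing import List, Optional
--
-- BAR_PREFIX = "b"
--
-- def _prefix(tok: str) -> Optional[str]:
--     idx = tok.find("-")
--     if idx < 1:
--         return None
--     return tok[:idx]
--
-- def segment_bars(tokens: List[str]) -> List[List[str]]: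
--     # One pass to collect bar-closing positions, then build bars as slices
--     # between consecutive boundaries; trailing tokens are never emitted.
--     ends = [i for i, tok in enumerate(tokens) if _prefix(tok) == BAR_PREFIX]
--     bars: List[List[str]] = []
--     start = 0
--     for i in ends:
--         bars.append(tokens[start:i + 1])
--         start = i + 1
--     return bars
-- ===== Notes on version B (the rewrite author's own statement) =====
-- stated objective: alternative
-- what changed: Replaces the token-by-token accumulator (append to current, flush on a b-token) by boundary-index collection first and then slicing the token list between consecutive boundaries.
import Mathlib
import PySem

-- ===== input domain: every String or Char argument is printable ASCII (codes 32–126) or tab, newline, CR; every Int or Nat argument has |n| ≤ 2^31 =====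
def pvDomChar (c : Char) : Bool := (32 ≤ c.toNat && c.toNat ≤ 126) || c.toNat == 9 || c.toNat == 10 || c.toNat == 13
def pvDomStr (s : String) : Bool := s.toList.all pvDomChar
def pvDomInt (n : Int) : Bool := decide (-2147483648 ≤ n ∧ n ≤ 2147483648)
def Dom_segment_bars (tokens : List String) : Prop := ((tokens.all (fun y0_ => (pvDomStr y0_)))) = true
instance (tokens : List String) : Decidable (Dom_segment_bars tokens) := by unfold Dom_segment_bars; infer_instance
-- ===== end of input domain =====

-- B replaces A's token-by-token accumulator by collecting boundary indices and slicing; alternative decomposition, same cost.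

-- ===== PORT A =====
-- helper _prefix, shared verbatim by both Python versions
def pvPrefix (tok : String) : Option String :=
  let idx := PySem.Str.find tok "-"
  if idx < 1 then none
  else some (PySem.Str.slice tok none (some idx))

def pvStepA (st : List (List String) × List String) (tok : String) :
    List (List String) × List String :=
  let current := st.2 ++ [tok]
  if pvPrefix tok = some "b" then (st.1 ++ [current], ([] : List String))
  else (st.1, current)

def segment_bars (tokens : List String) : List (List String) :=
  (tokens.foldl pvStepA ([], [])).1

-- ===== PORT B =====
def pvEnds (tokens : List String) : List Int :=
  ((PySem.List.enumerate tokens 0).filter (fun p => decide (pvPrefix p.2 = some "b"))).map (·.1)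

def pvStepB (tokens : List String) (st : List (List String) × Int) (i : Int) :
    List (List String) × Int :=
  (st.1 ++ [PySem.List.slice tokens (some st.2) (some (i + 1))], i + 1)

def segment_bars_alt (tokens : List String) : List (List String) :=
  ((pvEnds tokens).foldl (pvStepB tokens) ([], 0)).1

-- ===== PRECONDITION & SPEC =====
def Spec_segment_bars (tokens : List String) (out : List (List String)) : Prop := out = segment_bars_alt tokens
instance (tokens : List String) (out : List (List String)) : Decidable (Spec_segment_bars tokens out) := by unfold Spec_segment_bars; infer_instance

-- ===== CLAIM (what is proved, stated in full; the proofs are below) =====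
def Claim_equal_segment_bars : Prop := ∀ (tokens : List String), Dom_segment_bars tokens → Spec_segment_bars tokens (segment_bars tokens)

-- ===== LEMMAS AND PROOFS =====

-- canonical recursive description both ports are proved equal to
def pvSeg : List String → List (List String)
  | [] => []
  | t :: ts =>
    if pvPrefix t = some "b" then [t] :: pvSeg ts
    else match pvSeg ts with
      | [] => []
      | b :: bs => (t :: b) :: bs

-- ---- A side ----
theorem pvA_acc (ts : List String) : ∀ (bars : List (List String)) (cur : List String),
    ts.foldl pvStepA (bars, cur) =
      (bars ++ (ts.foldl pvStepA ([], cur)).1, (ts.foldl pvStepA ([], cur)).2) := by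
  induction ts with
  | nil => intro bars cur; simp
  | cons t ts ih =>
    intro bars cur
    simp only [List.foldl_cons, pvStepA]
    by_cases h : pvPrefix t = some "b"
    · rw [if_pos h, if_pos h, ih (bars ++ [cur ++ [t]]) [], ih ([] ++ [cur ++ [t]]) []]
      simp
    · rw [if_neg h, if_neg h, ih bars (cur ++ [t])]

theorem pvA_eq_seg (ts : List String) : ∀ (cur : List String),
    (ts.foldl pvStepA ([], cur)).1 =
      (match pvSeg ts with | [] => [] | b :: bs => (cur ++ b) :: bs) := by
  induction ts with
  | nil => intro cur; simp [pvSeg]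
  | cons t ts ih =>
    intro cur
    simp only [List.foldl_cons, pvStepA, pvSeg]
    by_cases h : pvPrefix t = some "b"
    · rw [if_pos h, if_pos h, pvA_acc, ih []]
      cases hseg : pvSeg ts <;> simp
    · rw [if_neg h, if_neg h, ih (cur ++ [t])]
      cases hseg : pvSeg ts <;> simp

theorem pvA_seg (ts : List String) : segment_bars ts = pvSeg ts := by
  unfold segment_bars
  rw [pvA_eq_seg]
  cases h : pvSeg ts <;> simp

-- ---- B side ----
theorem pvEnds_shift (ts : List String) : ∀ (s : Int),
    ((PySem.List.enumerate ts s).filter (fun p => decide (pvPrefix p.2 = some "b"))).map (·.1)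
      = (pvEnds ts).map (· + s) := by
  induction ts with
  | nil => intro s; simp [pvEnds, PySem.List.enumerate_nil]
  | cons t ts ih =>
    intro s
    simp only [pvEnds, PySem.List.enumerate_cons, List.filter_cons, zero_add]
    by_cases h : pvPrefix t = some "b"
    · simp only [h, decide_eq_true_eq, if_true, List.map_cons]
      rw [ih (s + 1), ih 1]
      simp only [List.map_map]
      congr 1
      · omega
      · apply List.map_congr_left; intro x _; simp; ring
    · simp only [decide_eq_true_eq, if_neg h]
      rw [ih (s + 1), ih 1]
      simp only [List.map_map]
      apply List.map_congr_left; intro x _; simp; ring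

theorem pvEnds_cons (t : String) (ts : List String) :
    pvEnds (t :: ts) =
      (if pvPrefix t = some "b" then [(0 : Int)] else []) ++ (pvEnds ts).map (· + 1) := by
  simp only [pvEnds, PySem.List.enumerate_cons, List.filter_cons, zero_add]
  by_cases h : pvPrefix t = some "b"
  · simp only [h, decide_eq_true_eq, if_true, List.map_cons]
    rw [pvEnds_shift ts 1]
    simp [pvEnds]
  · simp only [decide_eq_true_eq, if_neg h]
    rw [pvEnds_shift ts 1]
    simp [pvEnds]

theorem pvEnds_nonneg (ts : List String) : ∀ e ∈ pvEnds ts, 0 ≤ e := by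
  induction ts with
  | nil => simp [pvEnds, PySem.List.enumerate_nil]
  | cons t ts ih =>
    intro e he
    rw [pvEnds_cons] at he
    rcases List.mem_append.mp he with h | h
    · split at h <;> simp_all
    · obtain ⟨x, hx, rfl⟩ := List.mem_map.mp h
      have := ih x hx; omega

theorem pvB_acc (tokens : List String) (es : List Int) :
    ∀ (bars : List (List String)) (s : Int),
    es.foldl (pvStepB tokens) (bars, s) =
      (bars ++ (es.foldl (pvStepB tokens) ([], s)).1,
       (es.foldl (pvStepB tokens) ([], s)).2) := by
  induction es with
  | nil => intro bars s; simp
  | cons e es ih =>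
    intro bars s
    simp only [List.foldl_cons, pvStepB]
    rw [ih (bars ++ _) (e + 1), ih ([] ++ _) (e + 1)]
    simp

theorem pvSlice_shift (t : String) (ts : List String) (a b : Int) (ha : 0 ≤ a) (hb : 0 ≤ b) :
    PySem.List.slice (t :: ts) (some (a + 1)) (some (b + 1)) =
      PySem.List.slice ts (some a) (some b) := by
  rw [PySem.List.slice_toNat _ (by omega) (by omega), PySem.List.slice_toNat _ ha hb]
  have h1 : (a + 1).toNat = a.toNat + 1 := by omega
  have h2 : (b + 1).toNat = b.toNat + 1 := by omega
  rw [h1, h2]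
  simp [List.drop_succ_cons]

theorem pvB_shift (t : String) (ts : List String) (es : List Int)
    (hnn : ∀ e ∈ es, 0 ≤ e) : ∀ (s : Int), 0 ≤ s → ∀ (bars : List (List String)),
    (es.map (· + 1)).foldl (pvStepB (t :: ts)) (bars, s + 1) =
      ((es.foldl (pvStepB ts) (bars, s)).1, (es.foldl (pvStepB ts) (bars, s)).2 + 1) := by
  induction es with
  | nil => intro s hs bars; simp
  | cons e es ih =>
    intro s hs bars
    have he : 0 ≤ e := hnn e (by simp)
    simp only [List.map_cons, List.foldl_cons, pvStepB]
    rw [pvSlice_shift t ts s (e + 1) hs (by omega)]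
    exact ih (fun x hx => hnn x (by simp [hx])) (e + 1) (by omega) _

theorem pvEnds_nil_seg (ts : List String) (h : pvEnds ts = []) : pvSeg ts = [] := by
  induction ts with
  | nil => simp [pvSeg]
  | cons t ts ih =>
    rw [pvEnds_cons] at h
    by_cases hb : pvPrefix t = some "b"
    · simp [hb] at h
    · simp [hb] at h
      simp [pvSeg, hb, ih h]

theorem pvSlice_cons_take (t : String) (ts : List String) (e : Int) (he : 0 ≤ e) :
    PySem.List.slice (t :: ts) (some 0) (some (e + 1 + 1)) =
      t :: PySem.List.slice ts (some 0) (some (e + 1)) := by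
  rw [PySem.List.slice_toNat _ (by omega) (by omega),
      PySem.List.slice_toNat _ (by omega) (by omega)]
  have h1 : (e + 1 + 1).toNat = (e + 1).toNat + 1 := by omega
  simp [h1]

theorem pvB_seg (ts : List String) : segment_bars_alt ts = pvSeg ts := by
  induction ts with
  | nil => simp [segment_bars_alt, pvEnds, PySem.List.enumerate_nil, pvSeg]
  | cons t ts ih =>
    unfold segment_bars_alt
    rw [pvEnds_cons]
    by_cases hb : pvPrefix t = some "b"
    · rw [if_pos hb]
      simp only [List.cons_append, List.nil_append, List.foldl_cons, pvStepB]
      have h01 : PySem.List.slice (t :: ts) (some (0 : Int)) (some (0 + 1)) = [t] := by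
        rw [PySem.List.slice_toNat _ (by omega) (by omega)]; simp
      rw [h01]
      have hsh := pvB_shift t ts (pvEnds ts) (pvEnds_nonneg ts) 0 (by omega) [[t]]
      rw [hsh, pvB_acc]
      rw [show (pvSeg (t :: ts)) = [t] :: pvSeg ts by simp [pvSeg, hb]]
      rw [← ih]
      rfl
    · rw [if_neg hb]
      simp only [List.nil_append]
      cases hE : pvEnds ts with
      | nil =>
        simp [pvSeg, hb, pvEnds_nil_seg ts hE]
      | cons e es =>
        have hnn := pvEnds_nonneg ts
        rw [hE] at hnn
        have he : 0 ≤ e := hnn e (by simp)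
        have hes : ∀ x ∈ es, 0 ≤ x := fun x hx => hnn x (by simp [hx])
        simp only [List.map_cons, List.foldl_cons, pvStepB, List.nil_append]
        rw [pvSlice_cons_take t ts e he]
        have hsh := pvB_shift t ts es hes (e + 1) (by omega)
          [t :: PySem.List.slice ts (some 0) (some (e + 1))]
        rw [hsh, pvB_acc]
        have hIH : pvSeg ts =
            PySem.List.slice ts (some 0) (some (e + 1)) ::
              (es.foldl (pvStepB ts) ([], e + 1)).1 := by
          rw [← ih]
          unfold segment_bars_alt
          rw [hE]
          simp only [List.foldl_cons, pvStepB, List.nil_append]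
          rw [pvB_acc]
          simp
        simp [pvSeg, hb, hIH]

-- ===== VERDICT (by name: the statement is the Claim_ definition above) =====
theorem segment_bars_spec : Claim_equal_segment_bars := by
  intro tokens _
  unfold Spec_segment_bars
  rw [pvA_seg, pvB_seg]
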